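-- pv_equiv track=rewrite | github.com/krdyr/SudSov | functions.py | checkoneline
-- ===== SOURCE A (Python) =====
-- def checkoneline(anarray):
--     if len(anarray) != 9:
--         return 0
--     else:
--         flag = 1
--         for i in range(1, 10):
--             if i in anarray:
--                 flag = flag * 1
--             else:
--                 flag = flag * 0
--         return flag
-- ===== SOURCE B (Python) =====
-- def checkoneline(anarray):
--     return 1 if sorted(anarray) == list(range(1, 10)) else 0
-- ===== Notes on version B (the rewrite author's own statement) =====
-- stated objective: idiomatic
-- what changed: Replaces the length guard plus nine per-digit membership scans with a flag product by a single sort-and-compare: sorted(anarray) == list(range(1,10)), correct by pigeonhole (a length-9 list containing all of 1..9 is exactly a permutation of 1..9).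
import Mathlib
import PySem

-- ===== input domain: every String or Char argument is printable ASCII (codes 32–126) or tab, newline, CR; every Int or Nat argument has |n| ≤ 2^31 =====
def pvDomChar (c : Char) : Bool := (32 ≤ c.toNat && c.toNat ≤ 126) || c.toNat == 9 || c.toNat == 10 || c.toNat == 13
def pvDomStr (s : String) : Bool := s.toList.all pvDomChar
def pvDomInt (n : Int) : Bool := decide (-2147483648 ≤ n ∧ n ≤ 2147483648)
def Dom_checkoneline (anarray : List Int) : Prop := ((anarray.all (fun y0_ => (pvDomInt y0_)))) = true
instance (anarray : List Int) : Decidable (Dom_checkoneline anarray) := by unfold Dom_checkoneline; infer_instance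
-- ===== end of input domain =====

-- B replaces A's length guard and nine per-digit membership scans with a single sort-and-compare against [1..9].


-- ===== PORT A =====
def checkoneline (anarray : List Int) : Int :=
  if anarray.length ≠ 9 then 0
  else
    (PySem.List.pyRange 1 10 1).foldl
      (fun flag i => if anarray.contains i then flag * 1 else flag * 0) 1

-- ===== PORT B =====
def checkoneline_alt (anarray : List Int) : Int :=
  if PySem.List.sorted anarray (fun x => x) false = PySem.List.pyRange 1 10 1 then 1 else 0

-- ===== PRECONDITION & SPEC =====
def Spec_checkoneline (anarray : List Int) (out : Int) : Prop := out = checkoneline_alt anarray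
instance (anarray : List Int) (out : Int) : Decidable (Spec_checkoneline anarray out) := by unfold Spec_checkoneline; infer_instance

-- ===== CLAIM (what is proved, stated in full; the proofs are below) =====
def Claim_equal_checkoneline : Prop := ∀ (anarray : List Int), Dom_checkoneline anarray → Spec_checkoneline anarray (checkoneline anarray)

-- ===== LEMMAS AND PROOFS =====

-- ===== VERDICT (by name: the statement is the Claim_ definition above) =====
-- A's flag-product fold over any digit list: flag survives iff every digit is in the array.
lemma foldGen (a : List Int) (l : List Int) (flag : Int) :
    l.foldl (fun flag i => if a.contains i then flag * 1 else flag * 0) flag =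
    if (∀ i ∈ l, a.contains i) then flag else 0 := by
  induction l generalizing flag with
  | nil => simp
  | cons x t ih =>
    simp only [List.foldl_cons]
    rw [ih]
    by_cases hx : x ∈ a
    · simp [hx]
    · simp [hx]

-- pigeonhole: a length-9 list containing all of 1..9 is a permutation of [1..9]
lemma perm_iff (a : List Int) :
    a.Perm [1,2,3,4,5,6,7,8,9] ↔ (a.length = 9 ∧ ∀ i ∈ ([1,2,3,4,5,6,7,8,9] : List Int), i ∈ a) := by
  constructor
  · intro hp
    exact ⟨hp.length_eq, fun i hi => (hp.mem_iff).2 hi⟩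
  · rintro ⟨hl, hm⟩
    have hnd : ([1,2,3,4,5,6,7,8,9] : List Int).Nodup := by decide
    have hsub : List.Subperm ([1,2,3,4,5,6,7,8,9] : List Int) a := List.Nodup.subperm hnd hm
    exact (List.Subperm.perm_of_length_le hsub (by simp [hl])).symm

-- ===== VERDICT (by name: the statement is the Claim_ definition above) =====
theorem checkoneline_spec : Claim_equal_checkoneline := by
  intro a _
  unfold Spec_checkoneline checkoneline checkoneline_alt
  have hsp : PySem.List.sorted a (fun x => x) false = PySem.List.pyRange 1 10 1 ↔
      a.Perm [1,2,3,4,5,6,7,8,9] := by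
    have h9 : PySem.List.sorted ([1,2,3,4,5,6,7,8,9] : List Int) (fun x => x) false
        = PySem.List.pyRange 1 10 1 := by decide
    rw [← h9]
    exact PySem.List.sorted_id_eq_sorted_id_iff_perm a [1,2,3,4,5,6,7,8,9]
  rw [foldGen]
  by_cases hl : a.length = 9
  · simp only [hl, ne_eq, not_true_eq_false, if_false]
    have hr : PySem.List.pyRange 1 10 1 = [1,2,3,4,5,6,7,8,9] := by decide
    by_cases hm : ∀ i ∈ ([1,2,3,4,5,6,7,8,9] : List Int), i ∈ a
    · have : a.Perm [1,2,3,4,5,6,7,8,9] := (perm_iff a).2 ⟨hl, hm⟩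
      simp [hr, hsp.2 this, hm]
    · have hnp : ¬ a.Perm [1,2,3,4,5,6,7,8,9] := fun h => hm ((perm_iff a).1 h).2
      have hne : ¬ PySem.List.sorted a (fun x => x) false = PySem.List.pyRange 1 10 1 :=
        fun h => hnp (hsp.1 h)
      rw [hr] at hne
      simp only [hr]
      rw [if_neg hne, if_neg]
      intro hall
      exact hm (fun i hi => by fin_cases hi <;> simp_all)
  · have hlen : (PySem.List.sorted a (fun x => x) false).length = a.length :=
      PySem.List.length_sorted ..
    have hne : ¬ PySem.List.sorted a (fun x => x) false = PySem.List.pyRange 1 10 1 := by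
      intro h
      exact hl (by have := congrArg List.length h; simp [hlen] at this; omega)
    simp [hl, hne]
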